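-- pv_equiv track=rewrite | github.com/rgregory1/SMF_web | functions.py | henchman_stat_redux
-- ===== SOURCE A (Python) =====
-- def henchman_stat_redux(henchmen_group):
--     redux_stats = ['melee_attack', 'melee_defence', 'ranged_attack', 'ranged_defence', 'psyche_attack', 'psyche_defence']
--     for redux_stat in redux_stats:
--         for hero_key, hero_value in henchmen_group.items():
--             if hero_key == redux_stat:
--                 if hero_value == 4:
--                     henchmen_group[hero_key] = 2
--                 if hero_value == 5 or hero_value == 6:
--                     henchmen_group[hero_key] = 3
--     return(henchmen_group)
-- ===== SOURCE B (Python) =====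
-- REDUX_STATS = frozenset(['melee_attack', 'melee_defence', 'ranged_attack',
--                          'ranged_defence', 'psyche_attack', 'psyche_defence'])
-- REDUX_MAP = {4: 2, 5: 3, 6: 3}
--
-- def henchman_stat_redux(henchmen_group):
--     for key, value in henchmen_group.items():
--         if key in REDUX_STATS and value in REDUX_MAP:
--             henchmen_group[key] = REDUX_MAP[value]
--     return henchmen_group
-- ===== Notes on version B (the rewrite author's own statement) =====
-- stated objective: simpler
-- what changed: B makes one pass over the dict's own items with a constant-time set membership test and a value translation map, instead of A's six repeated full scans of the dict (one per stat name); both mutate the dict in place and return it.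
import Mathlib
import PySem

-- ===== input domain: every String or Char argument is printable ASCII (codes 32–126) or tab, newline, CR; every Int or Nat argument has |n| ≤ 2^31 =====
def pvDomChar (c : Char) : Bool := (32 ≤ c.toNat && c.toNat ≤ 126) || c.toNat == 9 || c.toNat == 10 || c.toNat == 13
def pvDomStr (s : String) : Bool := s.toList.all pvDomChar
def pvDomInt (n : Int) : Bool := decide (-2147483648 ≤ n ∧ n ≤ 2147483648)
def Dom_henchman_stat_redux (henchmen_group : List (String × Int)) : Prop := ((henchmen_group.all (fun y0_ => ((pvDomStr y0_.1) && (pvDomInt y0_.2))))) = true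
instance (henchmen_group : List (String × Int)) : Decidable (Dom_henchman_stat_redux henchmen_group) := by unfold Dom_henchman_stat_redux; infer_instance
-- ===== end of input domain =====

-- B replaces A's six full scans of the dict (one per stat name) with a single pass over
-- the dict's items using a set of stat names and a {4:2,5:3,6:3} translation map; the
-- equivalence proved is about the RETURN value (both Pythons also mutate the dict alike).

-- ===== PORT A =====
-- A: outer loop over the six stat names; for each, a full scan of the dict's items,
-- assigning henchmen_group[hero_key] when the key matches (two sequential ifs on hero_value).
def henchman_stat_redux (henchmen_group : List (String × Int)) : List (String × Int) :=
  ["melee_attack", "melee_defence", "ranged_attack", "ranged_defence", "psyche_attack", "psyche_defence"].foldl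
    (fun acc redux_stat =>
      acc.map (fun p =>
        if p.1 == redux_stat then
          (p.1, if p.2 == 4 then 2 else if p.2 == 5 || p.2 == 6 then 3 else p.2)
        else p))
    henchmen_group

-- ===== PORT B =====
def reduxStats : List String :=
  ["melee_attack", "melee_defence", "ranged_attack", "ranged_defence", "psyche_attack", "psyche_defence"]

def reduxMap : PySem.Dict Int Int := PySem.Dict.ofList [(4, 2), (5, 3), (6, 3)]

-- B: one pass over the items; set membership + map lookup, assignment in place.
def henchman_stat_redux_alt (henchmen_group : List (String × Int)) : List (String × Int) :=
  henchmen_group.map (fun p =>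
    if reduxStats.contains p.1 && (PySem.Dict.get? reduxMap p.2).isSome then
      (p.1, PySem.Dict.getD reduxMap p.2 p.2)
    else p)

-- ===== PRECONDITION & SPEC =====
def Spec_henchman_stat_redux (henchmen_group : List (String × Int)) (out : List (String × Int)) : Prop := out = henchman_stat_redux_alt henchmen_group
instance (henchmen_group : List (String × Int)) (out : List (String × Int)) : Decidable (Spec_henchman_stat_redux henchmen_group out) := by unfold Spec_henchman_stat_redux; infer_instance

-- ===== CLAIM (what is proved, stated in full; the proofs are below) =====
def Claim_equal_henchman_stat_redux : Prop := ∀ (henchmen_group : List (String × Int)), Dom_henchman_stat_redux henchmen_group → Spec_henchman_stat_redux henchmen_group (henchman_stat_redux henchmen_group)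

-- ===== LEMMAS AND PROOFS =====

theorem get?_reduxMap (v : Int) :
    PySem.Dict.get? reduxMap v
      = if v = 4 then some 2 else if v = 5 then some 3 else if v = 6 then some 3 else none := by
  have hm : reduxMap = PySem.Dict.mk [(4, 2), (5, 3), (6, 3)] := by decide
  rw [hm]
  by_cases h4 : v = 4 <;> by_cases h5 : v = 5 <;> by_cases h6 : v = 6 <;>
    simp [h4, h5, h6, PySem.Dict.get?] <;> omega

theorem getD_reduxMap (v : Int) :
    PySem.Dict.getD reduxMap v v
      = if v = 4 then 2 else if v = 5 then 3 else if v = 6 then 3 else v := by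
  have h : PySem.Dict.getD reduxMap v v = (PySem.Dict.get? reduxMap v).getD v := rfl
  rw [h, get?_reduxMap]
  split_ifs <;> rfl

-- pointwise: applying A's six per-stat update steps in sequence equals B's single check
theorem redux_pointwise (k : String) (v : Int) :
    (List.foldl
      (fun (q : String × Int) redux_stat =>
        if q.1 == redux_stat then
          (q.1, if q.2 == 4 then 2 else if q.2 == 5 || q.2 == 6 then 3 else q.2)
        else q)
      (k, v)
      ["melee_attack", "melee_defence", "ranged_attack", "ranged_defence", "psyche_attack", "psyche_defence"])
    = (if reduxStats.contains k && (PySem.Dict.get? reduxMap v).isSome then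
        (k, PySem.Dict.getD reduxMap v v)
      else (k, v)) := by
  simp only [get?_reduxMap, getD_reduxMap]
  by_cases h1 : k = "melee_attack" <;>
  by_cases h2 : k = "melee_defence" <;>
  by_cases h3 : k = "ranged_attack" <;>
  by_cases h4 : k = "ranged_defence" <;>
  by_cases h5 : k = "psyche_attack" <;>
  by_cases h6 : k = "psyche_defence" <;>
  simp_all [reduxStats, List.foldl]
  all_goals (by_cases hv4 : v = 4 <;> by_cases hv5 : v = 5 <;> by_cases hv6 : v = 6 <;> simp [hv4, hv5, hv6])

-- foldl of maps = map of pointwise foldl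
theorem foldl_map_comm {α β : Type} (g : α → β → α) (ss : List β) (xs : List α) :
    ss.foldl (fun acc s => acc.map (fun x => g x s)) xs
      = xs.map (fun x => ss.foldl g x) := by
  induction ss generalizing xs with
  | nil => simp
  | cons s tail ih => simp [List.foldl, ih, List.map_map]

-- ===== VERDICT (by name: the statement is the Claim_ definition above) =====
theorem henchman_stat_redux_spec : Claim_equal_henchman_stat_redux := by
  intro g _
  unfold Spec_henchman_stat_redux henchman_stat_redux henchman_stat_redux_alt
  rw [foldl_map_comm
    (fun (q : String × Int) redux_stat =>
      if q.1 == redux_stat then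
        (q.1, if q.2 == 4 then 2 else if q.2 == 5 || q.2 == 6 then 3 else q.2)
      else q)]
  refine List.map_congr_left (fun p _ => ?_)
  rcases p with ⟨k, v⟩
  rw [redux_pointwise k v]
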